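-- pv_equiv track=rewrite | github.com/KasheefAlee/AI_BootCamp_Final_Project | benchmarks/evaluator.py | _check_lama_answer
-- ===== SOURCE A (Python) =====
-- def _check_lama_answer(agent_answer: str, expected_answer: str) -> bool:
--     """Check if LAMA answer is correct"""
--     if not agent_answer or not expected_answer:
--         return False
--
--     agent_answer = agent_answer.lower().strip()
--     expected_answer = expected_answer.lower().strip()
--
--     # Direct match
--     if expected_answer in agent_answer:
--         return True
--
--     # Handle common variations
--     variations = {
--         'united states': ['usa', 'us', 'america'],
--         'united kingdom': ['uk', 'britain', 'england'],
--         'william shakespeare': ['shakespeare'],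
--         'bill gates': ['gates', 'william gates'],
--     }
--
--     for canonical, variants in variations.items():
--         if expected_answer == canonical:
--             return any(variant in agent_answer for variant in variants)
--         elif expected_answer in variants and canonical in agent_answer:
--             return True
--
--     return False
-- ===== SOURCE B (Python) =====
-- # Inverted lookup table built once: each canonical maps to its variants,
-- # each variant maps back to its canonical; one dict lookup replaces the loop.
-- _VARIATIONS = {
--     'united states': ['usa', 'us', 'america'],
--     'united kingdom': ['uk', 'britain', 'england'],
--     'william shakespeare': ['shakespeare'],
--     'bill gates': ['gates', 'william gates'],
-- }
--
-- _LOOKUP = {}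
-- for _canonical, _variants in _VARIATIONS.items():
--     _LOOKUP[_canonical] = _variants
--     for _v in _variants:
--         _LOOKUP[_v] = [_canonical]
--
--
-- def _check_lama_answer(agent_answer: str, expected_answer: str) -> bool:
--     """Check if LAMA answer is correct"""
--     if not agent_answer or not expected_answer:
--         return False
--
--     agent = agent_answer.lower().strip()
--     expected = expected_answer.lower().strip()
--
--     if expected in agent:
--         return True
--
--     terms = _LOOKUP.get(expected)
--     if terms is None:
--         return False
--     return any(t in agent for t in terms)
-- ===== Notes on version B (the rewrite author's own statement) =====
-- stated objective: simpler
-- what changed: Replaces the per-call scan over the variations table (with its two asymmetric branches) by a single pre-built inverted dict mapping each canonical to its variants and each variant to its canonical, so the body is one dict lookup plus any().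
import Mathlib
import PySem

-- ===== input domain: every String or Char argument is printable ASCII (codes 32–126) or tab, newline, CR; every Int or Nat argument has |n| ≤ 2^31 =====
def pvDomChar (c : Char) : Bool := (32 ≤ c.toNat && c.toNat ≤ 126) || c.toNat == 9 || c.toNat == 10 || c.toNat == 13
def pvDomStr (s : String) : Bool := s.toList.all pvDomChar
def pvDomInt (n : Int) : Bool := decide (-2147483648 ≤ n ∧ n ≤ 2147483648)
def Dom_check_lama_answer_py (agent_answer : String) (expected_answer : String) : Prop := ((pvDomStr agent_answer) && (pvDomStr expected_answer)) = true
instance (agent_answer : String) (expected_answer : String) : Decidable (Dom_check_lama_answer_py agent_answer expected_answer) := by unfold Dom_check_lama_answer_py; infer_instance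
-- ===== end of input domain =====

-- B replaces A's per-call loop over the variations table by one pre-built inverted
-- lookup dict (canonical → variants, variant → [canonical]); objective: simpler.

-- ===== PORT A =====
-- the 'for canonical, variants in variations.items():' loop of A, step for step
def lamaLoopA (agent expected : String) : List (String × List String) → Bool
  | [] => false
  | (canonical, variants) :: rest =>
    if expected = canonical then
      variants.any (fun v => PySem.Str.isIn v agent)
    else if decide (expected ∈ variants) && PySem.Str.isIn canonical agent then
      true
    else
      lamaLoopA agent expected rest

def check_lama_answer_py (agent_answer : String) (expected_answer : String) : Bool :=
  if agent_answer = "" || expected_answer = "" then false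
  else
    let agent := PySem.Str.strip (PySem.Str.lower agent_answer)
    let expected := PySem.Str.strip (PySem.Str.lower expected_answer)
    if PySem.Str.isIn expected agent then true
    else
      let variations : List (String × List String) :=
        [("united states", ["usa", "us", "america"]),
         ("united kingdom", ["uk", "britain", "england"]),
         ("william shakespeare", ["shakespeare"]),
         ("bill gates", ["gates", "william gates"])]
      lamaLoopA agent expected variations

-- ===== PORT B =====
-- the module-level inverted dict of Source B, written out in its insertion order
def lamaLookupB : PySem.Dict String (List String) :=
  PySem.Dict.ofList
    [("united states", ["usa", "us", "america"]),
     ("usa", ["united states"]),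
     ("us", ["united states"]),
     ("america", ["united states"]),
     ("united kingdom", ["uk", "britain", "england"]),
     ("uk", ["united kingdom"]),
     ("britain", ["united kingdom"]),
     ("england", ["united kingdom"]),
     ("william shakespeare", ["shakespeare"]),
     ("shakespeare", ["william shakespeare"]),
     ("bill gates", ["gates", "william gates"]),
     ("gates", ["bill gates"]),
     ("william gates", ["bill gates"])]

def check_lama_answer_py_alt (agent_answer : String) (expected_answer : String) : Bool :=
  if agent_answer = "" || expected_answer = "" then false
  else
    let agent := PySem.Str.strip (PySem.Str.lower agent_answer)
    let expected := PySem.Str.strip (PySem.Str.lower expected_answer)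
    if PySem.Str.isIn expected agent then true
    else
      match lamaLookupB.get? expected with
      | none => false
      | some terms => terms.any (fun t => PySem.Str.isIn t agent)

-- ===== PRECONDITION & SPEC =====
def Spec_check_lama_answer_py (agent_answer : String) (expected_answer : String) (out : Bool) : Prop := out = check_lama_answer_py_alt agent_answer expected_answer
instance (agent_answer : String) (expected_answer : String) (out : Bool) : Decidable (Spec_check_lama_answer_py agent_answer expected_answer out) := by unfold Spec_check_lama_answer_py; infer_instance

-- ===== CLAIM (what is proved, stated in full; the proofs are below) =====
def Claim_equal_check_lama_answer_py : Prop := ∀ (agent_answer : String) (expected_answer : String), Dom_check_lama_answer_py agent_answer expected_answer → Spec_check_lama_answer_py agent_answer expected_answer (check_lama_answer_py agent_answer expected_answer)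

-- ===== LEMMAS AND PROOFS =====

-- lamaLookupB, evaluated to its literal association list
theorem lamaLookupB_mk : lamaLookupB = PySem.Dict.mk
    [("united states", ["usa", "us", "america"]),
     ("usa", ["united states"]),
     ("us", ["united states"]),
     ("america", ["united states"]),
     ("united kingdom", ["uk", "britain", "england"]),
     ("uk", ["united kingdom"]),
     ("britain", ["united kingdom"]),
     ("england", ["united kingdom"]),
     ("william shakespeare", ["shakespeare"]),
     ("shakespeare", ["william shakespeare"]),
     ("bill gates", ["gates", "william gates"]),
     ("gates", ["bill gates"]),
     ("william gates", ["bill gates"])] := by decide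

-- the core: A's table scan agrees with B's inverted-dict lookup for every expected string
theorem lamaLoop_eq_lookup (agent expected : String) :
    lamaLoopA agent expected
      [("united states", ["usa", "us", "america"]),
       ("united kingdom", ["uk", "britain", "england"]),
       ("william shakespeare", ["shakespeare"]),
       ("bill gates", ["gates", "william gates"])]
    = (match (PySem.Dict.mk
        [("united states", ["usa", "us", "america"]),
         ("usa", ["united states"]),
         ("us", ["united states"]),
         ("america", ["united states"]),
         ("united kingdom", ["uk", "britain", "england"]),
         ("uk", ["united kingdom"]),
         ("britain", ["united kingdom"]),
         ("england", ["united kingdom"]),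
         ("william shakespeare", ["shakespeare"]),
         ("shakespeare", ["william shakespeare"]),
         ("bill gates", ["gates", "william gates"]),
         ("gates", ["bill gates"]),
         ("william gates", ["bill gates"])]).get? expected with
       | none => false
       | some terms => terms.any (fun t => PySem.Str.isIn t agent)) := by
  by_cases h1 : expected = "united states"
  · subst h1; simp [lamaLoopA, PySem.Dict.get?_mk_cons]
  by_cases h2 : expected = "usa"
  · subst h2; simp [lamaLoopA, PySem.Dict.get?_mk_cons]
  by_cases h3 : expected = "us"
  · subst h3; simp [lamaLoopA, PySem.Dict.get?_mk_cons]
  by_cases h4 : expected = "america"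
  · subst h4; simp [lamaLoopA, PySem.Dict.get?_mk_cons]
  by_cases h5 : expected = "united kingdom"
  · subst h5; simp [lamaLoopA, PySem.Dict.get?_mk_cons]
  by_cases h6 : expected = "uk"
  · subst h6; simp [lamaLoopA, PySem.Dict.get?_mk_cons]
  by_cases h7 : expected = "britain"
  · subst h7; simp [lamaLoopA, PySem.Dict.get?_mk_cons]
  by_cases h8 : expected = "england"
  · subst h8; simp [lamaLoopA, PySem.Dict.get?_mk_cons]
  by_cases h9 : expected = "william shakespeare"
  · subst h9; simp [lamaLoopA, PySem.Dict.get?_mk_cons]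
  by_cases h10 : expected = "shakespeare"
  · subst h10; simp [lamaLoopA, PySem.Dict.get?_mk_cons]
  by_cases h11 : expected = "bill gates"
  · subst h11; simp [lamaLoopA, PySem.Dict.get?_mk_cons]
  by_cases h12 : expected = "gates"
  · subst h12; simp [lamaLoopA, PySem.Dict.get?_mk_cons]
  by_cases h13 : expected = "william gates"
  · subst h13; simp [lamaLoopA, PySem.Dict.get?_mk_cons]
  simp [lamaLoopA, h1, h2, h3, h4, h5, h6, h7, h8, h9, h10, h11, h12, h13, Ne.symm h1, Ne.symm h2, Ne.symm h3, Ne.symm h4, Ne.symm h5, Ne.symm h6, Ne.symm h7, Ne.symm h8, Ne.symm h9, Ne.symm h10, Ne.symm h11, Ne.symm h12, Ne.symm h13, PySem.Dict.get?]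

set_option maxHeartbeats 1000000 in
theorem check_lama_answer_py_spec : Claim_equal_check_lama_answer_py := by
  intro agent_answer expected_answer _
  unfold Spec_check_lama_answer_py check_lama_answer_py check_lama_answer_py_alt
  split
  · rfl
  · dsimp only
    split
    · rfl
    · rw [lamaLookupB_mk]
      exact lamaLoop_eq_lookup (PySem.Str.strip (PySem.Str.lower agent_answer)) (PySem.Str.strip (PySem.Str.lower expected_answer))
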